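-- pv_equiv track=rewrite | github.com/ljun-liu/PEA_system | src/Analysis.py | deletion_analysis
-- ===== SOURCE A (Python) =====
-- def deletion_analysis(deletion):
--     '''Sort deleted phoneme by count
--
--     Parameters
--     ----------
--     deletion : list
--         a list of deleted phoneme
--
--     Returns
--     -------
--     deletion_list : list
--         a list of sorted deleted phoneme
--     deletion_count : int
--         the occurrence of deletion
--     '''
--     deletion_list = []
--     for element in set(deletion):
--         deletion_cnt = deletion.count(element)
--         deletion_list.append((element, deletion_cnt * (-1)))
--
--     deletion_list = sorted(deletion_list, key=lambda x: (x[1], x[0]))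
--     deletion_count = sum([cnt for _, cnt in deletion_list]) * (-1)
--     return deletion_list, deletion_count
-- ===== SOURCE B (Python) =====
-- def deletion_analysis(deletion):
--     srt = sorted(deletion)
--     pairs = []
--     i = 0
--     n = len(srt)
--     while i < n:
--         x = srt[i]
--         j = i + 1
--         while j < n and srt[j] == x:
--             j += 1
--         pairs.append((x, i - j))
--         i = j
--     pairs.sort(key=lambda p: (p[1], p[0]))
--     return pairs, n
-- ===== Notes on version B (the rewrite author's own statement) =====
-- stated objective: faster
-- what changed: Replaces A's per-distinct-element list.count scans over the whole list with one sort followed by a single linear pass over runs of equal consecutive elements, and computes the total count as len(deletion) instead of summing the pair list.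
import Mathlib
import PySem

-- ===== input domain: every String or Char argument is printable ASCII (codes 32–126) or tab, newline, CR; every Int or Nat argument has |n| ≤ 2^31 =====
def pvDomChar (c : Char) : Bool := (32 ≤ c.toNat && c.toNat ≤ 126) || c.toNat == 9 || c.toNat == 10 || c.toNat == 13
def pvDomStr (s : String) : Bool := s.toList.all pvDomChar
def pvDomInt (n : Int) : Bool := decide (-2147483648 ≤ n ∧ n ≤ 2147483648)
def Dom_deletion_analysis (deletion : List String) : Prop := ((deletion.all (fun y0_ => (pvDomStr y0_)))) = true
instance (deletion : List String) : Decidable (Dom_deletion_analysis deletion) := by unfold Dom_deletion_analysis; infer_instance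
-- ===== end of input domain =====

-- B replaces A's per-distinct-element `list.count` scans (quadratic) by one sort followed by a
-- single linear pass over runs of equal elements, and computes the total as len(deletion).

-- ===== PORT A =====
-- A iterates over set(deletion); its hash order is immaterial because the list is sorted
-- afterwards under a key that is injective on it, and the final sum is order-independent.
def deletion_analysis (deletion : List String) : (List (String × Int)) × Int :=
  let deletion_list : List (String × Int) :=
    (PySem.Set.ofList deletion).foldl
      (fun acc element => acc ++ [(element, (PySem.List.count deletion element : Int) * (-1))]) []
  let deletion_list := PySem.List.sorted2 deletion_list (fun x => x.2) (fun x => x.1)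
  let deletion_count := (deletion_list.map (fun p => p.2)).sum * (-1)
  (deletion_list, deletion_count)

-- ===== PORT B =====
-- inner `while j < n and srt[j] == x` of Source B: number of further copies of x and the rest of the list
def runSplit (x : String) : List String → Nat × List String
  | [] => (0, [])
  | y :: ys => if y == x then ((runSplit x ys).1 + 1, (runSplit x ys).2) else (0, y :: ys)

theorem runSplit_eq (x : String) (l : List String) :
    runSplit x l = ((l.takeWhile (· == x)).length, l.dropWhile (· == x)) := by
  induction l with
  | nil => rfl
  | cons y ys ih =>
    by_cases h : (y == x) = true <;>
      simp [runSplit, List.takeWhile, List.dropWhile, h, ih]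

-- outer `while i < n` of Source B: one (element, -run_length) pair per run
def groupPairs : List String → List (String × Int)
  | [] => []
  | x :: xs =>
      (x, -(((runSplit x xs).1 : Int) + 1)) :: groupPairs (runSplit x xs).2
termination_by l => l.length
decreasing_by
  simp only [runSplit_eq]
  exact Nat.lt_succ_of_le (List.length_dropWhile_le _ _)

def deletion_analysis_alt (deletion : List String) : (List (String × Int)) × Int :=
  let srt := PySem.List.sorted deletion (fun y => y)
  let pairs := groupPairs srt
  (PySem.List.sorted2 pairs (fun p => p.2) (fun p => p.1), (srt.length : Int))

-- ===== PRECONDITION & SPEC =====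
def Spec_deletion_analysis (deletion : List String) (out : (List (String × Int)) × Int) : Prop := out = deletion_analysis_alt deletion
instance (deletion : List String) (out : (List (String × Int)) × Int) : Decidable (Spec_deletion_analysis deletion out) := by unfold Spec_deletion_analysis; infer_instance

-- ===== CLAIM (what is proved, stated in full; the proofs are below) =====
def Claim_equal_deletion_analysis : Prop := ∀ (deletion : List String), Dom_deletion_analysis deletion → Spec_deletion_analysis deletion (deletion_analysis deletion)

-- ===== LEMMAS AND PROOFS =====

-- Python's tuple key (k1 x, k2 x) is the lexicographic key
theorem sorted2_eq_sorted_lex {α : Type} (xs : List α) (k1 : α → Int) (k2 : α → String) :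
    PySem.List.sorted2 xs k1 k2 = PySem.List.sorted xs (fun x => toLex (k1 x, k2 x)) := by
  rw [PySem.List.sorted_eq_foldl_insertBy]
  show List.foldl _ [] xs = _
  congr 1
  funext acc x
  congr 1
  funext a b
  have : toLex (k1 a, k2 a) < toLex (k1 b, k2 b) ↔
      k1 a < k1 b ∨ k1 a = k1 b ∧ k2 a < k2 b := Prod.Lex.lt_iff
  by_cases h1 : k1 a < k1 b <;> by_cases h2 : k1 b < k1 a <;>
    by_cases h3 : k2 a < k2 b <;>
    simp [h1, h2, h3, this] <;> omega

theorem lexKey_injective : Function.Injective (fun p : String × Int => toLex (p.2, p.1)) := by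
  intro ⟨a1, a2⟩ ⟨b1, b2⟩ h
  simp only [Prod.mk.injEq] at *
  have := congrArg (fun x : Lex (Int × String) => (ofLex x).1) h
  have := congrArg (fun x : Lex (Int × String) => (ofLex x).2) h
  simp_all

-- every first component of a group pair comes from the list
theorem groupPairs_fst_mem : ∀ (l : List String) (p : String × Int), p ∈ groupPairs l → p.1 ∈ l
  | [], p, h => by rw [groupPairs] at h; simp at h
  | x :: xs, p, h => by
    rw [groupPairs] at h
    rcases List.mem_cons.mp h with h | h
    · simp [h]
    · have hm := groupPairs_fst_mem _ p h
      rw [runSplit_eq] at hm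
      exact List.mem_cons_of_mem _ ((List.dropWhile_sublist _).mem hm)
termination_by l => l.length
decreasing_by
  simp only [runSplit_eq]
  exact Nat.lt_succ_of_le (List.length_dropWhile_le _ _)

-- on a ≤-sorted list: no copy of the head survives into the dropWhile tail
theorem head_not_mem_drop (x : String) (xs : List String)
    (h : (x :: xs).Pairwise (· ≤ ·)) : x ∉ xs.dropWhile (· == x) := by
  intro hx
  rcases hd : xs.dropWhile (· == x) with _ | ⟨y, t⟩
  · simp [hd] at hx
  · have hy : (y == x) = false := by
      have := List.head?_dropWhile_not (· == x) xs
      rw [hd] at this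
      simpa using this
    have hyx : y ≠ x := by simpa using hy
    rw [hd] at hx
    rcases List.mem_cons.mp hx with h1 | h1
    · exact hyx h1.symm
    · -- x appears after y in the sorted list: y ≤ x and x ≤ y
      have hsub : (y :: t).Sublist (x :: xs) := by
        rw [← hd]
        exact (List.dropWhile_sublist _).cons _
      have hp : (y :: t).Pairwise (· ≤ ·) := List.Pairwise.sublist hsub h
      have hyle : y ≤ x := (List.pairwise_cons.mp hp).1 x h1
      have hxy : x ≤ y := by
        have hmem : y ∈ xs := by
          have hy2 : y ∈ xs.dropWhile (· == x) := by rw [hd]; exact List.mem_cons_self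
          exact (List.dropWhile_sublist _).mem hy2
        exact (List.pairwise_cons.mp h).1 y hmem
      exact hyx (le_antisymm hyle hxy)

-- characterisation of groupPairs on a ≤-sorted list
theorem mem_groupPairs : ∀ (l : List String), l.Pairwise (· ≤ ·) → ∀ (p : String × Int),
    (p ∈ groupPairs l ↔ p.1 ∈ l ∧ p.2 = -(PySem.List.count l p.1 : Int))
  | [], _, p => by rw [groupPairs]; simp
  | x :: xs, h, p => by
    obtain ⟨e, c⟩ := p
    rw [groupPairs, runSplit_eq]
    simp only [PySem.List.count]
    have hxdrop : x ∉ xs.dropWhile (· == x) := head_not_mem_drop x xs h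
    have hdp : (xs.dropWhile (· == x)).Pairwise (· ≤ ·) :=
      List.Pairwise.sublist (List.dropWhile_sublist _) (List.pairwise_cons.mp h).2
    have ih := mem_groupPairs (xs.dropWhile (· == x)) hdp (e, c)
    simp only [PySem.List.count] at ih
    have hsplit : xs.takeWhile (· == x) ++ xs.dropWhile (· == x) = xs :=
      List.takeWhile_append_dropWhile
    have htake : ∀ y ∈ xs.takeWhile (· == x), y = x := by
      intro y hy
      have := List.mem_takeWhile_imp hy
      simpa using this
    have hcountx : List.count x (x :: xs) = (xs.takeWhile (· == x)).length + 1 := by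
      rw [List.count_cons_self]
      conv_lhs => rw [← hsplit]
      rw [List.count_append]
      have h1 : List.count x (xs.takeWhile (· == x)) = (xs.takeWhile (· == x)).length :=
        List.count_eq_length.mpr (fun y hy => (htake y hy).symm)
      have h2 : List.count x (xs.dropWhile (· == x)) = 0 :=
        List.count_eq_zero.mpr hxdrop
      omega
    have hcount_ne : ∀ (a : String), a ≠ x →
        List.count a (x :: xs) = List.count a (xs.dropWhile (· == x)) := by
      intro a ha
      rw [List.count_cons_of_ne (Ne.symm ha)]
      conv_lhs => rw [← hsplit]
      rw [List.count_append]
      have h0 : List.count a (xs.takeWhile (· == x)) = 0 :=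
        List.count_eq_zero.mpr (fun hm => ha (htake a hm))
      omega
    constructor
    · intro hp
      rcases List.mem_cons.mp hp with hp | hp
      · obtain ⟨he, hc⟩ := Prod.mk.injEq .. ▸ hp
        subst he
        refine ⟨List.mem_cons_self, ?_⟩
        rw [hcountx]
        push_cast at hc ⊢
        omega
      · obtain ⟨hmem, hval⟩ := ih.mp hp
        have hne : e ≠ x := fun hee => hxdrop (hee ▸ hmem)
        refine ⟨List.mem_cons_of_mem _ ((List.dropWhile_sublist _).mem hmem), ?_⟩
        show c = -(List.count e (x :: xs) : Int)
        rw [hcount_ne e hne]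
        exact hval
    · rintro ⟨hmem, hval⟩
      rw [List.mem_cons]
      by_cases he : e = x
      · left
        subst he
        rw [hcountx] at hval
        rw [Prod.mk.injEq]
        exact ⟨rfl, by omega⟩
      · right
        apply ih.mpr
        have hmem' : e ∈ xs.dropWhile (· == x) := by
          rcases List.mem_cons.mp hmem with h1 | h1
          · exact absurd h1 he
          · rw [← hsplit] at h1
            rcases List.mem_append.mp h1 with h2 | h2
            · exact absurd (htake _ h2) he
            · exact h2
        refine ⟨hmem', ?_⟩
        show c = -(List.count e (xs.dropWhile (· == x)) : Int)
        rw [← hcount_ne e he]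
        exact hval
termination_by l => l.length
decreasing_by
  exact Nat.lt_succ_of_le (List.length_dropWhile_le _ _)

-- first components of groupPairs are distinct (on a sorted list)
theorem groupPairs_nodup : ∀ (l : List String), l.Pairwise (· ≤ ·) → (groupPairs l).Nodup
  | [], _ => by rw [groupPairs]; simp
  | x :: xs, h => by
    rw [groupPairs, runSplit_eq]
    have hxdrop : x ∉ xs.dropWhile (· == x) := head_not_mem_drop x xs h
    have hdp : (xs.dropWhile (· == x)).Pairwise (· ≤ ·) :=
      List.Pairwise.sublist (List.dropWhile_sublist _) (List.pairwise_cons.mp h).2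
    refine List.nodup_cons.mpr ⟨?_, groupPairs_nodup _ hdp⟩
    intro hmem
    exact hxdrop (groupPairs_fst_mem _ _ hmem)
termination_by l => l.length
decreasing_by
  exact Nat.lt_succ_of_le (List.length_dropWhile_le _ _)

-- the group sizes add up to the length of the list
theorem groupPairs_sum : ∀ (l : List String),
    ((groupPairs l).map (fun p => p.2)).sum = -(l.length : Int)
  | [] => by rw [groupPairs]; simp
  | x :: xs => by
    rw [groupPairs, runSplit_eq]
    have ih := groupPairs_sum (xs.dropWhile (· == x))
    have hsplit : (xs.takeWhile (· == x)).length + (xs.dropWhile (· == x)).length = xs.length := by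
      rw [← List.length_append, List.takeWhile_append_dropWhile]
    simp only [List.map_cons, List.sum_cons, ih]
    simp only [List.length_cons]
    omega
termination_by l => l.length
decreasing_by
  exact Nat.lt_succ_of_le (List.length_dropWhile_le _ _)

-- A's pre-sort list and B's pre-sort list are permutations of each other
theorem pre_sort_perm (deletion : List String) :
    (groupPairs (PySem.List.sorted deletion (fun y => y))).Perm
      ((PySem.Set.ofList deletion).map
        (fun element => (element, (PySem.List.count deletion element : Int) * (-1)))) := by
  set S := PySem.List.sorted deletion (fun y => y) with hS
  have hSp : S.Pairwise (· ≤ ·) := PySem.List.sorted_pairwise deletion (fun y => y)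
  have hSperm : S.Perm deletion := PySem.List.sorted_perm deletion (fun y => y) false
  have hcount : ∀ e, PySem.List.count S e = PySem.List.count deletion e := by
    intro e; exact hSperm.count_eq e
  have hmemS : ∀ e, e ∈ S ↔ e ∈ deletion := fun e => hSperm.mem_iff
  -- membership characterisations
  have hmemB : ∀ p : String × Int, p ∈ groupPairs S ↔
      p.1 ∈ deletion ∧ p.2 = -(List.count p.1 deletion : Int) := by
    intro p
    rw [mem_groupPairs S hSp p, hcount, hmemS]
    simp only [PySem.List.count]
  have hmemA : ∀ p : String × Int,
      p ∈ (PySem.Set.ofList deletion).map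
        (fun element => (element, (PySem.List.count deletion element : Int) * (-1))) ↔
      p.1 ∈ deletion ∧ p.2 = -(List.count p.1 deletion : Int) := by
    intro ⟨p1, p2⟩
    simp only [List.mem_map, PySem.Set.mem_ofList, PySem.List.count]
    constructor
    · rintro ⟨a, ha, he⟩
      obtain ⟨h1, h2⟩ := Prod.mk.injEq .. ▸ he
      subst h1
      exact ⟨ha, by omega⟩
    · rintro ⟨h1, h2⟩
      exact ⟨p1, h1, by simp; omega⟩
  -- nodup on both sides
  have hnodupB : (groupPairs S).Nodup := groupPairs_nodup S hSp
  have hnodupA : ((PySem.Set.ofList deletion).map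
      (fun element => (element, (PySem.List.count deletion element : Int) * (-1)))).Nodup := by
    refine (PySem.Set.nodup_ofList deletion).map ?_
    intro a b he
    exact (Prod.mk.injEq .. ▸ he).1
  refine List.perm_of_nodup_nodup_toFinset_eq hnodupB hnodupA ?_
  ext p
  simp only [List.mem_toFinset, hmemB, hmemA]

-- ===== VERDICT (by name: the statement is the Claim_ definition above) =====
theorem deletion_analysis_spec : Claim_equal_deletion_analysis := by
  intro deletion _
  show deletion_analysis deletion = deletion_analysis_alt deletion
  unfold deletion_analysis deletion_analysis_alt
  simp only
  have hperm := pre_sort_perm deletion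
  have hsorted :
      PySem.List.sorted2 ((PySem.Set.ofList deletion).foldl
        (fun acc element => acc ++ [(element, (PySem.List.count deletion element : Int) * (-1))]) [])
        (fun x => x.2) (fun x => x.1) =
      PySem.List.sorted2 (groupPairs (PySem.List.sorted deletion (fun y => y)))
        (fun p => p.2) (fun p => p.1) := by
    rw [PySem.List.foldl_append_singleton_eq_map, List.nil_append]
    rw [sorted2_eq_sorted_lex, sorted2_eq_sorted_lex]
    exact (PySem.List.sorted_eq_sorted_of_perm _ _ _ lexKey_injective hperm).symm
  rw [hsorted]
  congr 1
  -- the sum over the sorted list equals the sum over groupPairs, which is -length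
  have hp2 : (PySem.List.sorted2 (groupPairs (PySem.List.sorted deletion (fun y => y)))
      (fun p => p.2) (fun p => p.1)).Perm (groupPairs (PySem.List.sorted deletion (fun y => y))) :=
    PySem.List.sorted2_perm _ _ _ _
  have hsum := (hp2.map (fun p : String × Int => p.2)).sum_eq
  rw [hsum, groupPairs_sum, PySem.List.length_sorted]
  ring
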